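-- pv_equiv track=rewrite | github.com/aangee09/bigdata | martin.py | trailing_zero
-- ===== SOURCE A (Python) =====
-- def trailing_zero(x):
--     if x == 0:
--         return 0
--     count = 0
--     while (x & 1) == 0:
--         count += 1
--         x >>= 1
--     return count
-- ===== SOURCE B (Python) =====
-- def trailing_zero(x):
--     if x == 0:
--         return 0
--     return (x & -x).bit_length() - 1
-- ===== Notes on version B (the rewrite author's own statement) =====
-- stated objective: idiomatic
-- what changed: Replaces the shift-one-bit-at-a-time loop by the closed-form bit trick (x & -x).bit_length() - 1, which isolates the lowest set bit and reads its position directly.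
import Mathlib
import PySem

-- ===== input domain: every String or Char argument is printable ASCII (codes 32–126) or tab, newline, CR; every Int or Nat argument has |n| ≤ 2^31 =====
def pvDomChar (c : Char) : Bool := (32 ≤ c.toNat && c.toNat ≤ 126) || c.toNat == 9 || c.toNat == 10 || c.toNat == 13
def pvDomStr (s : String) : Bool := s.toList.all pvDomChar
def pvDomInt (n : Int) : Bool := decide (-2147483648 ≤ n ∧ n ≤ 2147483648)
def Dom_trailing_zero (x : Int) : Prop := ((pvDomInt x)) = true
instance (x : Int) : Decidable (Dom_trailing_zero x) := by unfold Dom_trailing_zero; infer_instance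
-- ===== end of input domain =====

-- B replaces A's shift-one-bit-at-a-time loop by the closed form (x & -x).bit_length() - 1.


-- ===== PORT A =====
-- A's while loop: '(x & 1) == 0' is ported as 'band x 1 = 0' and 'x >>= 1' as 'floordiv x 2'
-- (Python '>> 1' is floor division by 2, exact for every int).  The 'x ≠ 0' conjunct is ONLY
-- a termination guard: A only enters the loop with x ≠ 0 and the loop body preserves x ≠ 0,
-- so on every input A reaches the guard is never the deciding condition.
def tzLoop (x : Int) (count : Int) : Int :=
  if h : x ≠ 0 ∧ PySem.Int.band x 1 = 0 then
    tzLoop (PySem.Int.floordiv x 2) (count + 1)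
  else count
termination_by x.natAbs
decreasing_by
  obtain ⟨hx, hb⟩ := h
  rw [PySem.Int.band_one, PySem.Int.mod_eq_emod_of_pos (by omega)] at hb
  obtain ⟨k, hk⟩ := Int.dvd_of_emod_eq_zero hb
  rw [PySem.Int.floordiv_eq_ediv_of_pos (by omega), hk, Int.mul_ediv_cancel_left _ (by omega)]
  omega

def trailing_zero (x : Int) : Int :=
  if x = 0 then 0 else tzLoop x 0

-- ===== PORT B =====
-- literal port of Source B: '(x & -x).bit_length() - 1' via PySem.Int.band / bitLength
def trailing_zero_alt (x : Int) : Int :=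
  if x = 0 then 0
  else Int.ofNat (PySem.Int.bitLength (PySem.Int.band x (-x))) - 1

-- ===== PRECONDITION & SPEC =====
def Spec_trailing_zero (x : Int) (out : Int) : Prop := out = trailing_zero_alt x
instance (x : Int) (out : Int) : Decidable (Spec_trailing_zero x out) := by unfold Spec_trailing_zero; infer_instance

-- ===== CLAIM (what is proved, stated in full; the proofs are below) =====
def Claim_equal_trailing_zero : Prop := ∀ (x : Int), Dom_trailing_zero x → Spec_trailing_zero x (trailing_zero x)

-- ===== LEMMAS AND PROOFS =====

/-- Number of trailing zero bits of a positive natural number. -/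
def tzN (m : Nat) : Nat :=
  if h : m = 0 ∨ m % 2 = 1 then 0 else tzN (m / 2) + 1
termination_by m
decreasing_by
  omega

lemma tzN_odd (m : Nat) (h : m % 2 = 1) : tzN m = 0 := by
  rw [tzN, dif_pos (Or.inr h)]

lemma tzN_even (m : Nat) (h0 : m ≠ 0) (h : m % 2 = 0) : tzN m = tzN (m / 2) + 1 := by
  rw [tzN, dif_neg (by omega)]

lemma and_double_double_add_one (a b : Nat) : (2 * a) &&& (2 * b + 1) = 2 * (a &&& b) := by
  apply Nat.eq_of_testBit_eq
  intro i
  cases i with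
  | zero => simp [Nat.testBit_zero]
  | succ j =>
      have h1 : (2 * b + 1) / 2 = b := by omega
      rw [Nat.testBit_and, Nat.testBit_succ, Nat.testBit_succ, Nat.testBit_succ,
        Nat.mul_div_cancel_left a (by omega), h1,
        Nat.mul_div_cancel_left (a &&& b) (by omega), Nat.testBit_and]

/-- `m - (m &&& (m-1))` isolates the lowest set bit: it is `2 ^ tzN m`. -/
lemma sub_and_pred (m : Nat) (hm : m ≠ 0) : m - (m &&& (m - 1)) = 2 ^ tzN m := by
  induction m using Nat.strong_induction_on with
  | _ m ih =>
    rcases Nat.even_or_odd m with he | ho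
    · obtain ⟨k, hk⟩ := he
      have hk2 : m = 2 * k := by omega
      have hkne : k ≠ 0 := by omega
      have hrec := ih k (by omega) hkne
      have hsplit : m - 1 = 2 * (k - 1) + 1 := by omega
      have hand : m &&& (m - 1) = 2 * (k &&& (k - 1)) := by
        rw [hsplit, hk2, and_double_double_add_one]
      have hle : k &&& (k - 1) ≤ k := Nat.and_le_left
      have htz : tzN m = tzN k + 1 := by
        have hm2 : m / 2 = k := by omega
        rw [tzN_even m (by omega) (by omega), hm2]
      rw [hand, htz, pow_succ]
      omega
    · obtain ⟨k, hk⟩ := ho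
      have hodd : m % 2 = 1 := by omega
      rw [tzN_odd m hodd, pow_zero]
      have hand : m &&& (m - 1) = 2 * (k &&& k) := by
        have h1 : m = 2 * k + 1 := by omega
        have h2 : m - 1 = 2 * k := by omega
        rw [h2, h1, Nat.and_comm, and_double_double_add_one]
      rw [Nat.and_self] at hand
      omega

/-- On `x ≠ 0`, `band x (-x)` reduces to the Nat expression `m - (m &&& (m-1))`, `m = |x|`. -/
lemma band_neg_self (x : Int) (hx : x ≠ 0) :
    PySem.Int.band x (-x) = ((x.natAbs - (x.natAbs &&& (x.natAbs - 1)) : Nat) : Int) := by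
  unfold PySem.Int.band
  rcases lt_or_gt_of_ne hx with hneg | hpos
  · have h1 : ¬ (0 ≤ x) := by omega
    have h2 : 0 ≤ -x := by omega
    simp only [h1, h2, if_true, if_false]
    have ha : (-x).toNat = x.natAbs := by omega
    have hb : (-x - 1).toNat = x.natAbs - 1 := by omega
    rw [ha, hb]
  · have h1 : 0 ≤ x := by omega
    have h2 : ¬ (0 ≤ -x) := by omega
    simp only [h1, h2, if_true, if_false]
    have ha : x.toNat = x.natAbs := by omega
    have hb : (-(-x) - 1).toNat = x.natAbs - 1 := by omega
    rw [ha, hb]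

lemma bitLength_two_pow (t : Nat) : PySem.Int.bitLength ((2 ^ t : Nat) : Int) = t + 1 := by
  set L := PySem.Int.bitLength ((2 ^ t : Nat) : Int) with hL
  have habs : ((2 ^ t : Nat) : Int).natAbs = 2 ^ t := Int.natAbs_natCast _
  have hlt : 2 ^ t < 2 ^ L := by
    have := PySem.Int.lt_two_pow_bitLength ((2 ^ t : Nat) : Int)
    rwa [habs] at this
  have hne : ((2 ^ t : Nat) : Int) ≠ 0 := by positivity
  have hge : 2 ^ (L - 1) ≤ 2 ^ t := by
    have := PySem.Int.two_pow_bitLength_le ((2 ^ t : Nat) : Int) hne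
    rwa [habs] at this
  have h1 : t < L := (Nat.pow_lt_pow_iff_right (by omega)).mp hlt
  have h2 : L - 1 ≤ t := (Nat.pow_le_pow_iff_right (by omega)).mp hge
  omega

lemma band_one_zero_iff (x : Int) : PySem.Int.band x 1 = 0 ↔ x.natAbs % 2 = 0 := by
  rw [PySem.Int.band_one, PySem.Int.mod_eq_emod_of_pos (by omega)]
  omega

lemma natAbs_half (x : Int) (h : x.natAbs % 2 = 0) :
    (PySem.Int.floordiv x 2).natAbs = x.natAbs / 2 := by
  rw [PySem.Int.floordiv_eq_ediv_of_pos (by omega)]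
  obtain ⟨k, hk⟩ : (2 : Int) ∣ x := by
    have : (2 : Nat) ∣ x.natAbs := by omega
    exact (Int.natAbs_dvd_natAbs (a := 2)).mp (by exact_mod_cast this)
  rw [hk, Int.mul_ediv_cancel_left _ (by omega)]
  omega

lemma tzLoop_eq (x count : Int) (hx : x ≠ 0) :
    tzLoop x count = count + (tzN x.natAbs : Int) := by
  induction hn : x.natAbs using Nat.strong_induction_on generalizing x count with
  | _ n ih =>
    subst hn
    rw [tzLoop]
    by_cases hb : PySem.Int.band x 1 = 0
    · have hev : x.natAbs % 2 = 0 := (band_one_zero_iff x).mp hb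
      have hne2 : PySem.Int.floordiv x 2 ≠ 0 := by
        rw [PySem.Int.floordiv_eq_ediv_of_pos (by omega)]
        obtain ⟨k, hk⟩ : (2 : Int) ∣ x := by
          have : (2 : Nat) ∣ x.natAbs := by omega
          exact (Int.natAbs_dvd_natAbs (a := 2)).mp (by exact_mod_cast this)
        rw [hk, Int.mul_ediv_cancel_left _ (by omega)]
        omega
      have hdec : (PySem.Int.floordiv x 2).natAbs < x.natAbs := by
        rw [natAbs_half x hev]; omega
      rw [dif_pos ⟨hx, hb⟩, ih _ hdec _ _ hne2 rfl, natAbs_half x hev,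
        tzN_even x.natAbs (by omega) hev]
      push_cast
      ring
    · rw [dif_neg (by tauto), tzN_odd x.natAbs (by
        have := (band_one_zero_iff x).not.mp hb
        omega)]
      omega

-- ===== VERDICT (by name: the statement is the Claim_ definition above) =====
theorem trailing_zero_spec : Claim_equal_trailing_zero := by
  intro x _
  unfold Spec_trailing_zero trailing_zero trailing_zero_alt
  by_cases hx : x = 0
  · simp [hx]
  · rw [if_neg hx, if_neg hx, tzLoop_eq x 0 hx, band_neg_self x hx,
      sub_and_pred x.natAbs (by omega), bitLength_two_pow]
    push_cast [Int.ofNat_eq_natCast]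
    omega
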